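/- GENERATED by farm/mkstatement.py from design/units.split.tsv — do not edit.
   THE SPLIT of the proof unit `start_decoder.C9` into `start_decoder.C9a`, `start_decoder.C9b`, `start_decoder.C9c`, `start_decoder.C9d`: the children's statements give the parent's
   UNCHANGED statement (so nothing above the parent — callers, compositions — is touched by the split). -/
import Vorbis.Spec.StartDecoderC9
import Vorbis.Spec.Units.start_decoder_C9
import Vorbis.Spec.Units.start_decoder_C9a
import Vorbis.Spec.Units.start_decoder_C9b
import Vorbis.Spec.Units.start_decoder_C9c
import Vorbis.Spec.Units.start_decoder_C9d
namespace Vorbis.Spec.Splits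
open X86 X86.User Asan

/-- The children of the split unit `start_decoder.C9` prove it, by `Vorbis.Spec.StartDecoder.SegC9.of_parts`. -/
theorem start_decoder_C9
    (h_start_decoder_C9a : Vorbis.Spec.start_decoder_C9a.Statement)
    (h_start_decoder_C9b : Vorbis.Spec.start_decoder_C9b.Statement)
    (h_start_decoder_C9c : Vorbis.Spec.start_decoder_C9c.Statement)
    (h_start_decoder_C9d : Vorbis.Spec.start_decoder_C9d.Statement) :
    Vorbis.Spec.start_decoder_C9.Statement := by
  intro Lay _hLay μ _hμ u₀ _hcode _h_compute_accelerated_huffman _h_get_bits _h_asan_store1_noabort _h_asan_load4_noabort _h_error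
  apply Vorbis.Spec.StartDecoder.SegC9.of_parts
  · exact h_start_decoder_C9a Lay _hLay μ _hμ u₀ _hcode _h_compute_accelerated_huffman
  · exact h_start_decoder_C9b Lay _hLay μ _hμ u₀ _hcode _h_get_bits
  · exact h_start_decoder_C9c Lay _hLay μ _hμ u₀ _hcode _h_asan_store1_noabort _h_asan_load4_noabort _h_error
  · exact h_start_decoder_C9d Lay _hLay μ _hμ u₀ _hcode

end Vorbis.Spec.Splits
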